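-- pv_equiv track=rewrite | github.com/anaslari23/data-harvester-ai-1 | core/scraper_engine.py | _extract_website_targets
-- ===== SOURCE A (Python) =====
-- from typing import Any, Dict, Iterable, List, Sequence, Type
--
-- def _extract_website_targets(records: Sequence[Dict[str, Any]]) -> List[str]:
--     seen = set()
--     websites: List[str] = []
--     for record in records:
--         website = str(record.get("website", "")).strip()
--         if not website.startswith(("http://", "https://")):
--             continue
--         if website in seen:
--             continue
--         seen.add(website)
--         websites.append(website)
--     return websites
-- ===== SOURCE B (Python) =====
-- from typing import Any, Dict, List, Sequence
--
-- def _extract_website_targets(records: Sequence[Dict[str, Any]]) -> List[str]: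
--     # Back-to-front: prepend each valid website and drop its later duplicates
--     # from the accumulated suffix result; first occurrences win by construction.
--     out: List[str] = []
--     for record in reversed(records):
--         w = str(record.get("website", "")).strip()
--         if w.startswith(("http://", "https://")):
--             out = [w] + [x for x in out if x != w]
--     return out
-- ===== Notes on version B (the rewrite author's own statement) =====
-- stated objective: alternative
-- what changed: Traverses the records back-to-front and deduplicates by prepending each valid website while removing its later duplicates from the accumulated suffix result, instead of A's forward pass guarded by a seen-set.
import Mathlib
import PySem

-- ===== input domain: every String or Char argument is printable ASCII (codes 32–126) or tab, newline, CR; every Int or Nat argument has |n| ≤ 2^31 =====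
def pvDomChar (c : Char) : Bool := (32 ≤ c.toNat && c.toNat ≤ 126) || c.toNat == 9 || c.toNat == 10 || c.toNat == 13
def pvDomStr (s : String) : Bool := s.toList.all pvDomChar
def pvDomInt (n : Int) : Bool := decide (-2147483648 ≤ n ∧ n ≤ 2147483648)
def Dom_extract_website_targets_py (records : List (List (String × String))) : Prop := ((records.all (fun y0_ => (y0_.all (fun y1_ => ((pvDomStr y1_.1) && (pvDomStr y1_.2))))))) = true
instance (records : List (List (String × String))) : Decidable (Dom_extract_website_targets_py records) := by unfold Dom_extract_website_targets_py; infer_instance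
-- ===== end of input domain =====

-- B traverses the records back-to-front, prepending each valid website and removing its later
-- duplicates from the accumulated result, instead of A's forward pass with a seen-set; alternative decomposition, not faster.

-- ===== PORT A =====
def extract_website_targets_py (records : List (List (String × String))) : List String :=
  (records.foldl (fun (st : PySem.Set String × List String) record =>
      let website := PySem.Str.strip (PySem.Dict.getD (PySem.Dict.mk record) "website" "")
      if !(PySem.Str.startswith website "http://" || PySem.Str.startswith website "https://") then st
      else if PySem.Set.contains st.1 website then st
      else (PySem.Set.add st.1 website, st.2 ++ [website]))
    (PySem.Set.empty, [])).2

-- ===== PORT B =====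
def extract_website_targets_py_alt (records : List (List (String × String))) : List String :=
  records.foldr (fun record out =>
    let w := PySem.Str.strip (PySem.Dict.getD (PySem.Dict.mk record) "website" "")
    if PySem.Str.startswith w "http://" || PySem.Str.startswith w "https://" then
      w :: out.filter (fun x => x ≠ w)
    else out) []

-- ===== PRECONDITION & SPEC =====
def Spec_extract_website_targets_py (records : List (List (String × String))) (out : List String) : Prop := out = extract_website_targets_py_alt records
instance (records : List (List (String × String))) (out : List String) : Decidable (Spec_extract_website_targets_py records out) := by unfold Spec_extract_website_targets_py; infer_instance

-- ===== CLAIM (what is proved, stated in full; the proofs are below) =====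
def Claim_equal_extract_website_targets_py : Prop := ∀ (records : List (List (String × String))), Dom_extract_website_targets_py records → Spec_extract_website_targets_py records (extract_website_targets_py records)

-- ===== LEMMAS AND PROOFS =====

-- A's loop step on the already mapped/filtered strings
def pvStep (st : PySem.Set String × List String) (w : String) : PySem.Set String × List String :=
  if PySem.Set.contains st.1 w then st else (PySem.Set.add st.1 w, st.2 ++ [w])

-- B's dedup step on the already mapped/filtered strings
def pvKeep (w : String) (out : List String) : List String := w :: out.filter (fun x => x ≠ w)

def pvMapFilter (records : List (List (String × String))) : List String :=
  (records.map (fun record => PySem.Str.strip (PySem.Dict.getD (PySem.Dict.mk record) "website" ""))).filter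
    (fun w => PySem.Str.startswith w "http://" || PySem.Str.startswith w "https://")

-- fuse A's inline map/filter into a fold over the filtered mapped list
theorem pvFuse (records : List (List (String × String))) (st : PySem.Set String × List String) :
    records.foldl (fun (st : PySem.Set String × List String) record =>
      let website := PySem.Str.strip (PySem.Dict.getD (PySem.Dict.mk record) "website" "")
      if !(PySem.Str.startswith website "http://" || PySem.Str.startswith website "https://") then st
      else if PySem.Set.contains st.1 website then st
      else (PySem.Set.add st.1 website, st.2 ++ [website])) st
    = (pvMapFilter records).foldl pvStep st := by
  induction records generalizing st with
  | nil => rfl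
  | cons r rs ih =>
    simp only [pvMapFilter, List.map_cons, List.filter_cons, List.foldl_cons]
    by_cases h : (PySem.Str.startswith (PySem.Str.strip (PySem.Dict.getD (PySem.Dict.mk r) "website" ""))
        "http://" || PySem.Str.startswith (PySem.Str.strip (PySem.Dict.getD (PySem.Dict.mk r) "website" "")) "https://") = true
    · simp only [h, Bool.not_true, Bool.false_eq_true, if_false]
      rw [ih]; rfl
    · simp only [h, Bool.not_false, Bool.not_eq_eq_eq_not, Bool.not_true] at *
      simp only [if_true, Bool.false_eq_true, if_false, ih]
      rfl

-- fuse B's inline map/filter into a foldr over the filtered mapped list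
theorem pvFuseB (records : List (List (String × String))) :
    extract_website_targets_py_alt records = (pvMapFilter records).foldr pvKeep [] := by
  unfold extract_website_targets_py_alt
  induction records with
  | nil => rfl
  | cons r rs ih =>
    simp only [pvMapFilter, List.map_cons, List.filter_cons, List.foldr_cons] at *
    by_cases h : (PySem.Str.startswith (PySem.Str.strip (PySem.Dict.getD (PySem.Dict.mk r) "website" ""))
        "http://" || PySem.Str.startswith (PySem.Str.strip (PySem.Dict.getD (PySem.Dict.mk r) "website" "")) "https://") = true
    · simp only [h, if_true, List.foldr_cons, ih]; rfl
    · simp only [h, Bool.false_eq_true, if_false, ih]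

-- with equal components, A's fold keeps them equal and both become Set.update
theorem pvInv (ws : List String) (s : List String) :
    ws.foldl pvStep (s, s) = (PySem.Set.update s ws, PySem.Set.update s ws) := by
  induction ws generalizing s with
  | nil => simp [PySem.Set.update]
  | cons w ws ih =>
    have hstep : pvStep (s, s) w = (PySem.Set.add s w, PySem.Set.add s w) := by
      by_cases h : w ∈ s <;> simp [pvStep, PySem.Set.add, PySem.Set.contains, h]
    rw [List.foldl_cons, hstep, ih, PySem.Set.update_cons]

-- Set.update s ws appends exactly B's foldr-dedup of ws, filtered to elements not already in s
theorem pvUpdateF (ws : List String) (s : List String) :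
    PySem.Set.update s ws = s ++ (ws.foldr pvKeep []).filter (fun x => x ∉ s) := by
  induction ws generalizing s with
  | nil => simp [PySem.Set.update]
  | cons w ws ih =>
    rw [PySem.Set.update_cons, List.foldr_cons, ih, pvKeep,
      List.filter_cons, List.filter_filter]
    by_cases h : w ∈ s
    · have hadd : PySem.Set.add s w = s := by simp [PySem.Set.add, PySem.Set.contains, h]
      rw [hadd]
      simp only [h, not_true, decide_false, Bool.false_eq_true, if_false]
      congr 1
      apply List.filter_congr
      intro x _
      by_cases hx : x ∈ s
      · simp [hx]
      · have : x ≠ w := fun e => hx (e ▸ h)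
        simp [hx, this]
    · have hadd : PySem.Set.add s w = s ++ [w] := by simp [PySem.Set.add, PySem.Set.contains, h]
      rw [hadd]
      simp only [h, not_false_iff, decide_true, if_true, List.append_assoc, List.singleton_append]
      congr 2
      apply List.filter_congr
      intro x _
      by_cases hx : x ∈ s
      · simp [hx]
      · simp [hx, List.mem_append]

-- ===== VERDICT (by name: the statement is the Claim_ definition above) =====
theorem extract_website_targets_py_spec : Claim_equal_extract_website_targets_py := by
  intro records _
  show extract_website_targets_py records = extract_website_targets_py_alt records
  unfold extract_website_targets_py
  rw [pvFuse, pvFuseB]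
  have h1 := pvInv (pvMapFilter records) []
  simp only [PySem.Set.empty]
  rw [h1]
  rw [pvUpdateF]
  simp
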